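-- pv_equiv track=rewrite | github.com/nyxssmith/jenkinsTests | fontio3/fontio3/glyf/ttcontourgroups.py | _depthMap
-- ===== SOURCE A (Python) =====
-- def _depthMap(possParents, key, currDepth=1):
--     r = {}
--
--     for childIndex in possParents.get(key, set()):
--         if childIndex in possParents:
--             r[childIndex] = currDepth
--             dSub = _depthMap(possParents, childIndex, currDepth+1)
--
--             for i, dep in dSub.items():
--                 r[i] = max(dep, r.setdefault(i, 0))
--
--         else:
--             r[childIndex] = max(currDepth, r.setdefault(childIndex, 0))
--
--     return r
-- ===== SOURCE B (Python) =====
-- def _depthMap(possParents, key, currDepth=1):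
--     memo = {}
--
--     def go(k, d):
--         cached = memo.get((k, d))
--         if cached is not None:
--             return cached
--         r = {}
--         for childIndex in possParents.get(k, set()):
--             if childIndex in possParents:
--                 r[childIndex] = d
--                 for i, dep in go(childIndex, d + 1).items():
--                     r[i] = max(dep, r.get(i, 0))
--             else:
--                 r[childIndex] = max(d, r.get(childIndex, 0))
--         memo[(k, d)] = r
--         return r
--
--     return go(key, currDepth)
-- ===== Notes on version B (the rewrite author's own statement) =====
-- stated objective: alternative
-- what changed: B replaces A's naive recursion with dynamic programming: a memo dict keyed by (node, depth) caches each subtree's depth map, so each (node, depth) pair is computed once and re-read on repeated visits.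
import Mathlib
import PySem

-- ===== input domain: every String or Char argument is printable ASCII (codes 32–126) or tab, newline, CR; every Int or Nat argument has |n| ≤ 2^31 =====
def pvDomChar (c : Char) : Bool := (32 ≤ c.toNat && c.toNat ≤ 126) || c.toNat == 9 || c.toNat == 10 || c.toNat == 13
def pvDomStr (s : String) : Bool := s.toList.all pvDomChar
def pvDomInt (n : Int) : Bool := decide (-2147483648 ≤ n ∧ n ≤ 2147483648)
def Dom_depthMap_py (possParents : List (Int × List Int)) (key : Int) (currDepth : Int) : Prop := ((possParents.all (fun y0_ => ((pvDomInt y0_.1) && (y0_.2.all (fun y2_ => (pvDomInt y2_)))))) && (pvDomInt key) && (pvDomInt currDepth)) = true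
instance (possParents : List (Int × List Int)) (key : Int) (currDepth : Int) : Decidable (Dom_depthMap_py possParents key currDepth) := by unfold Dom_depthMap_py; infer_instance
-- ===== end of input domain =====

-- B memoizes the recursion on (node, depth) pairs (dynamic programming) instead of A's
-- plain recursion; return values are identical wherever A terminates.

-- ===== PORT A =====
-- possParents is a Python dict; both ports read it through these accessors.
def pvDict (pp : List (Int × List Int)) : PySem.Dict Int (List Int) := PySem.Dict.mk pp
-- possParents.get(k, set())
def pvChildren (pp : List (Int × List Int)) (k : Int) : List Int := PySem.Dict.getD (pvDict pp) k []
-- k in possParents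
def pvIsKey (pp : List (Int × List Int)) (c : Int) : Bool := PySem.Dict.contains (pvDict pp) c

-- A's update:  r[i] = max(dep, r.setdefault(i, 0))
def pvSetMax (r : PySem.Dict Int Int) (i : Int) (dep : Int) : PySem.Dict Int Int :=
  let r1 := PySem.Dict.setdefault r i 0
  PySem.Dict.insert r1 i (max dep (PySem.Dict.getD r1 i 0))

-- A's recursion, with a fuel argument only to make it total in Lean (fuel
-- possParents.length+1 suffices on every input Pre_ admits).
def dmFuel (pp : List (Int × List Int)) : Nat → Int → Int → PySem.Dict Int Int
  | 0, _, _ => PySem.Dict.empty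
  | f+1, key, currDepth =>
    (pvChildren pp key).foldl (fun r childIndex =>
      if pvIsKey pp childIndex then
        let r1 := PySem.Dict.insert r childIndex currDepth
        let dSub := dmFuel pp f childIndex (currDepth+1)
        dSub.items.foldl (fun r p => pvSetMax r p.1 p.2) r1
      else
        pvSetMax r childIndex currDepth) PySem.Dict.empty

def depthMap_py (possParents : List (Int × List Int)) (key : Int) (currDepth : Int) : List (Int × Int) :=
  (dmFuel possParents (possParents.length+1) key currDepth).items

-- ===== PORT B =====
-- B's update:  r[i] = max(dep, r.get(i, 0))
def pvPutMax (r : PySem.Dict Int Int) (i : Int) (dep : Int) : PySem.Dict Int Int :=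
  PySem.Dict.insert r i (max dep (PySem.Dict.getD r i 0))

-- B's memoized go(k, d), threading the memo dict; same fuel-for-totality device.
def goFuel (pp : List (Int × List Int)) : Nat → Int → Int →
    PySem.Dict (Int × Int) (PySem.Dict Int Int) →
    PySem.Dict (Int × Int) (PySem.Dict Int Int) × PySem.Dict Int Int
  | 0, _, _, memo => (memo, PySem.Dict.empty)
  | f+1, k, d, memo =>
    match PySem.Dict.get? memo (k, d) with
    | some cached => (memo, cached)
    | none =>
      let st := (pvChildren pp k).foldl (fun st childIndex =>
        if pvIsKey pp childIndex then
          let ms := goFuel pp f childIndex (d+1) st.1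
          (ms.1, ms.2.items.foldl (fun r p => pvPutMax r p.1 p.2)
                   (PySem.Dict.insert st.2 childIndex d))
        else
          (st.1, pvPutMax st.2 childIndex d)) (memo, PySem.Dict.empty)
      (PySem.Dict.insert st.1 (k, d) st.2, st.2)

def depthMap_py_alt (possParents : List (Int × List Int)) (key : Int) (currDepth : Int) : List (Int × Int) :=
  (goFuel possParents (possParents.length+1) key currDepth PySem.Dict.empty).2.items

-- ===== PRECONDITION & SPEC =====
-- children of k that are themselves keys (the only ones the recursion descends into)
def pvKids (pp : List (Int × List Int)) (k : Int) : List Int :=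
  (pvChildren pp k).filter (pvIsKey pp)

-- pvRank pp n = keys whose internal-descendant tree has height < n (Kahn-style iteration)
def pvRank (pp : List (Int × List Int)) : Nat → List Int
  | 0 => []
  | n+1 => (pp.map Prod.fst).filter (fun k => (pvKids pp k).all (fun c => (pvRank pp n).contains c))

-- Pre_ excludes exactly the inputs on which a cycle of the parent→child graph is reachable
-- from key: there Python A recurses forever (RecursionError). Everywhere else A returns.
def Pre_depthMap_py (possParents : List (Int × List Int)) (key : Int) (currDepth : Int) : Prop :=
  pvIsKey possParents key = true → key ∈ pvRank possParents possParents.length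
instance (possParents : List (Int × List Int)) (key : Int) (currDepth : Int) : Decidable (Pre_depthMap_py possParents key currDepth) := by unfold Pre_depthMap_py; infer_instance

def pvWitness_depthMap_py : (List (Int × List Int)) × Int × Int := ([(0, [1, 2]), (1, [2])], 0, 1)

def Spec_depthMap_py (possParents : List (Int × List Int)) (key : Int) (currDepth : Int) (out : List (Int × Int)) : Prop := out = depthMap_py_alt possParents key currDepth
instance (possParents : List (Int × List Int)) (key : Int) (currDepth : Int) (out : List (Int × Int)) : Decidable (Spec_depthMap_py possParents key currDepth out) := by unfold Spec_depthMap_py; infer_instance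

-- ===== CLAIM (what is proved, stated in full; the proofs are below) =====
def Claim_equal_depthMap_py : Prop := ∀ (possParents : List (Int × List Int)) (key : Int) (currDepth : Int), Dom_depthMap_py possParents key currDepth → Pre_depthMap_py possParents key currDepth → Spec_depthMap_py possParents key currDepth (depthMap_py possParents key currDepth)

-- ===== LEMMAS AND PROOFS =====

theorem pvSetMax_eq (r : PySem.Dict Int Int) (i dep : Int) : pvSetMax r i dep = pvPutMax r i dep := by
  cases h : PySem.Dict.contains r i with
  | true =>
    simp [pvSetMax, pvPutMax, PySem.Dict.setdefault_of_contains r (0:Int) h]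
  | false =>
    simp [pvSetMax, pvPutMax, PySem.Dict.setdefault_of_not_contains r (0:Int) h,
      PySem.Dict.getD_insert_self, PySem.Dict.insert_insert_self,
      PySem.Dict.getD_of_not_contains r (0:Int) h]

theorem pvRank_succ_mem {pp : List (Int × List Int)} {k : Int} {n : Nat}
    (h : k ∈ pvRank pp (n+1)) :
    pvIsKey pp k = true ∧ ∀ c ∈ pvKids pp k, c ∈ pvRank pp n := by
  rw [pvRank, List.mem_filter] at h
  obtain ⟨hk, hall⟩ := h
  simp only [List.all_eq_true] at hall
  refine ⟨?_, ?_⟩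
  · simp only [pvIsKey, pvDict, PySem.Dict.contains_mk, List.any_eq_true]
    obtain ⟨p, hp, hpk⟩ := List.mem_map.mp hk
    exact ⟨p, hp, by simp [hpk]⟩
  · intro c hc
    simpa using hall c hc

theorem dmFuel_nonkey {pp : List (Int × List Int)} {k : Int} (h : pvIsKey pp k = false)
    (f : Nat) (cd : Int) : dmFuel pp (f+1) k cd = PySem.Dict.empty := by
  have hc : pvChildren pp k = [] := by
    simp only [pvChildren]
    exact PySem.Dict.getD_of_not_contains _ _ h
  simp [dmFuel, hc]

def pvMI (pp : List (Int × List Int)) (memo : PySem.Dict (Int × Int) (PySem.Dict Int Int)) : Prop :=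
  ∀ kd v, PySem.Dict.get? memo kd = some v → v = dmFuel pp (pp.length+1) kd.1 kd.2

theorem pvMI_empty (pp : List (Int × List Int)) : pvMI pp PySem.Dict.empty := by
  intro kd v hv
  rw [PySem.Dict.get?_empty] at hv
  exact absurd hv (by simp)
theorem dmFuel_succ (pp : List (Int × List Int)) (f : Nat) (k cd : Int) :
    dmFuel pp (f+1) k cd = (pvChildren pp k).foldl (fun r c =>
      if pvIsKey pp c then
        (dmFuel pp f c (cd+1)).items.foldl (fun r p => pvSetMax r p.1 p.2) (PySem.Dict.insert r c cd)
      else pvSetMax r c cd) PySem.Dict.empty := rfl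

theorem goFuel_succ (pp : List (Int × List Int)) (f : Nat) (k d : Int)
    (memo : PySem.Dict (Int × Int) (PySem.Dict Int Int)) :
    goFuel pp (f+1) k d memo =
      match PySem.Dict.get? memo (k, d) with
      | some cached => (memo, cached)
      | none =>
        let st := (pvChildren pp k).foldl (fun st c =>
          if pvIsKey pp c then
            let ms := goFuel pp f c (d+1) st.1
            (ms.1, ms.2.items.foldl (fun r p => pvPutMax r p.1 p.2) (PySem.Dict.insert st.2 c d))
          else (st.1, pvPutMax st.2 c d)) (memo, PySem.Dict.empty)
        (PySem.Dict.insert st.1 (k, d) st.2, st.2) := rfl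

theorem dmFuel_stable {pp : List (Int × List Int)} (n : Nat) :
    ∀ k, k ∈ pvRank pp n → ∀ f g : Nat, n ≤ f → n ≤ g → ∀ cd,
      dmFuel pp f k cd = dmFuel pp g k cd := by
  induction n with
  | zero => intro k hk; simp [pvRank] at hk
  | succ n ih =>
    intro k hk f g hf hg cd
    obtain ⟨hkey, hkids⟩ := pvRank_succ_mem hk
    obtain ⟨f', rfl⟩ : ∃ f', f = f'+1 := ⟨f-1, by omega⟩
    obtain ⟨g', rfl⟩ : ∃ g', g = g'+1 := ⟨g-1, by omega⟩
    rw [dmFuel_succ, dmFuel_succ]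
    apply PySem.List.foldl_congr_mem
    intro acc c hc
    by_cases hck : pvIsKey pp c = true
    · have : dmFuel pp f' c (cd+1) = dmFuel pp g' c (cd+1) :=
        ih c (hkids c (List.mem_filter.mpr ⟨hc, hck⟩)) f' g' (by omega) (by omega) (cd+1)
      simp only [hck, if_true, this]
    · simp [hck]

-- the child loop of B computes the child loop of A (with full-fuel subcalls) and
-- preserves the memo invariant
theorem goFold {pp : List (Int × List Int)} {n : Nat} (d : Int) (f : Nat)
    (IH : ∀ c ∈ pvRank pp n, ∀ (d' : Int) memo, n ≤ f → pvMI pp memo →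
      (goFuel pp f c d' memo).2 = dmFuel pp (pp.length+1) c d' ∧ pvMI pp (goFuel pp f c d' memo).1)
    (hf : n ≤ f) :
    ∀ (l : List Int), (∀ c ∈ l, pvIsKey pp c = true → c ∈ pvRank pp n) →
    ∀ memo r, pvMI pp memo →
      (l.foldl (fun st c =>
          if pvIsKey pp c then
            let ms := goFuel pp f c (d+1) st.1
            (ms.1, ms.2.items.foldl (fun r p => pvPutMax r p.1 p.2) (PySem.Dict.insert st.2 c d))
          else (st.1, pvPutMax st.2 c d)) (memo, r)).2
        = l.foldl (fun r c =>
            if pvIsKey pp c then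
              (dmFuel pp (pp.length+1) c (d+1)).items.foldl (fun r p => pvSetMax r p.1 p.2)
                (PySem.Dict.insert r c d)
            else pvSetMax r c d) r
      ∧ pvMI pp (l.foldl (fun st c =>
          if pvIsKey pp c then
            let ms := goFuel pp f c (d+1) st.1
            (ms.1, ms.2.items.foldl (fun r p => pvPutMax r p.1 p.2) (PySem.Dict.insert st.2 c d))
          else (st.1, pvPutMax st.2 c d)) (memo, r)).1 := by
  intro l
  induction l with
  | nil => intro _ memo r hm; exact ⟨rfl, hm⟩
  | cons c l ihl =>
    intro hl memo r hm
    by_cases hck : pvIsKey pp c = true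
    · have hsub := IH c (hl c (List.mem_cons_self ..) hck) (d+1) memo hf hm
      simp only [List.foldl_cons, hck, if_true]
      have hmerge : ((goFuel pp f c (d+1) memo).2.items.foldl (fun r p => pvPutMax r p.1 p.2)
            (PySem.Dict.insert r c d))
          = (dmFuel pp (pp.length+1) c (d+1)).items.foldl (fun r p => pvSetMax r p.1 p.2)
            (PySem.Dict.insert r c d) := by
        rw [hsub.1]
        exact PySem.List.foldl_congr_mem _ _ _ _ (fun acc p _ => (pvSetMax_eq acc p.1 p.2).symm)
      rw [hmerge]
      exact ihl (fun x hx => hl x (List.mem_cons_of_mem _ hx)) _ _ hsub.2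
    · simp only [List.foldl_cons, hck, if_false, Bool.false_eq_true]
      rw [pvSetMax_eq]
      exact ihl (fun x hx => hl x (List.mem_cons_of_mem _ hx)) _ _ hm
theorem pvMI_insert {pp : List (Int × List Int)} {memo : PySem.Dict (Int × Int) (PySem.Dict Int Int)}
    (hm : pvMI pp memo) {k d : Int} {v : PySem.Dict Int Int}
    (hv : v = dmFuel pp (pp.length+1) k d) : pvMI pp (PySem.Dict.insert memo (k, d) v) := by
  intro kd w hw
  rw [PySem.Dict.get?_insert] at hw
  split at hw
  · rename_i heq
    cases hw
    subst heq
    exact hv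
  · exact hm kd w hw

theorem goFuel_nonkey {pp : List (Int × List Int)} {k : Int} (h : pvIsKey pp k = false)
    (f : Nat) (d : Int) (memo : PySem.Dict (Int × Int) (PySem.Dict Int Int)) (hm : pvMI pp memo) :
    (goFuel pp (f+1) k d memo).2 = dmFuel pp (pp.length+1) k d ∧
      pvMI pp (goFuel pp (f+1) k d memo).1 := by
  have hdm : dmFuel pp (pp.length+1) k d = PySem.Dict.empty := dmFuel_nonkey h pp.length d
  have hc : pvChildren pp k = [] := by
    simp only [pvChildren]
    exact PySem.Dict.getD_of_not_contains _ _ h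
  rw [goFuel_succ]
  cases hm0 : PySem.Dict.get? memo (k, d) with
  | some cached => exact ⟨hm (k, d) cached hm0, hm⟩
  | none =>
    refine ⟨by simp [hc, hdm], ?_⟩
    simp only [hc, List.foldl_nil]
    exact pvMI_insert hm hdm.symm

theorem goFuel_correct {pp : List (Int × List Int)} (n : Nat) :
    n ≤ pp.length →
    ∀ k, k ∈ pvRank pp n → ∀ (d : Int) (f : Nat) memo, n ≤ f → pvMI pp memo →
      (goFuel pp f k d memo).2 = dmFuel pp (pp.length+1) k d ∧
        pvMI pp (goFuel pp f k d memo).1 := by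
  induction n with
  | zero => intro _ k hk; simp [pvRank] at hk
  | succ n ih =>
    intro hn k hk d f memo hf hm
    obtain ⟨hkey, hkids⟩ := pvRank_succ_mem hk
    obtain ⟨f', rfl⟩ : ∃ f', f = f'+1 := ⟨f-1, by omega⟩
    have hIH : ∀ c ∈ pvRank pp n, ∀ (d' : Int) memo', n ≤ f' → pvMI pp memo' →
        (goFuel pp f' c d' memo').2 = dmFuel pp (pp.length+1) c d' ∧
          pvMI pp (goFuel pp f' c d' memo').1 :=
      fun c hc d' memo' hf' hm' => ih (by omega) c hc d' f' memo' hf' hm'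
    rw [goFuel_succ]
    cases hm0 : PySem.Dict.get? memo (k, d) with
    | some cached => exact ⟨hm (k, d) cached hm0, hm⟩
    | none =>
      have hfold := goFold d f' hIH (by omega) (pvChildren pp k)
        (fun c hc hck => hkids c (List.mem_filter.mpr ⟨hc, hck⟩)) memo PySem.Dict.empty hm
      -- A's value at full fuel, with subcalls lifted to full fuel by stability
      have hA : dmFuel pp (pp.length+1) k d
          = (pvChildren pp k).foldl (fun r c =>
              if pvIsKey pp c then
                (dmFuel pp (pp.length+1) c (d+1)).items.foldl (fun r p => pvSetMax r p.1 p.2)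
                  (PySem.Dict.insert r c d)
              else pvSetMax r c d) PySem.Dict.empty := by
        rw [dmFuel_succ]
        apply PySem.List.foldl_congr_mem
        intro acc c hc
        by_cases hck : pvIsKey pp c = true
        · have := dmFuel_stable n c (hkids c (List.mem_filter.mpr ⟨hc, hck⟩))
            pp.length (pp.length+1) (by omega) (by omega) (d+1)
          simp only [hck, if_true, this]
        · simp [hck]
      simp only []
      refine ⟨?_, ?_⟩
      · rw [hfold.1, hA]
      · exact pvMI_insert hfold.2 (by rw [hfold.1, hA])

-- ===== VERDICT (by name: the statement is the Claim_ definition above) =====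
theorem depthMap_py_spec : Claim_equal_depthMap_py := by
  unfold Claim_equal_depthMap_py
  intro pp key cd _ hpre
  unfold Spec_depthMap_py depthMap_py depthMap_py_alt
  by_cases hk : pvIsKey pp key = true
  · have hmem := hpre hk
    have h := goFuel_correct pp.length (le_refl _) key hmem cd (pp.length+1)
      PySem.Dict.empty (by omega) (pvMI_empty pp)
    rw [h.1]
  · have hk' : pvIsKey pp key = false := by simpa using hk
    have h := goFuel_nonkey hk' pp.length cd PySem.Dict.empty (pvMI_empty pp)
    rw [h.1]
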